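-- pv_equiv track=rewrite | github.com/dinhthe9212/SPORT_BETTING_MODULE | betting_service/betting/views.py | _calculate_overall_risk_level
-- ===== SOURCE A (Python) =====
-- def _calculate_overall_risk_level(risk_results):
--     """Tính toán risk level tổng thể từ các risk results"""
--     if not risk_results:
--         return 'UNKNOWN'
--
--     # Đếm số lượng mỗi risk level
--     risk_counts = {}
--     for result in risk_results:
--         level = result.get('risk_level', 'UNKNOWN')
--         risk_counts[level] = risk_counts.get(level, 0) + 1
--
--     # Xác định risk level tổng thể
--     if risk_counts.get('HIGH', 0) > 0:
--         return 'HIGH'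
--     elif risk_counts.get('MEDIUM', 0) > 0:
--         return 'MEDIUM'
--     elif risk_counts.get('LOW', 0) > 0:
--         return 'LOW'
--     elif risk_counts.get('VERY_LOW', 0) > 0:
--         return 'VERY_LOW'
--     else:
--         return 'UNKNOWN'
-- ===== SOURCE B (Python) =====
-- def _calculate_overall_risk_level(risk_results):
--     names = ['HIGH', 'MEDIUM', 'LOW', 'VERY_LOW']
--     best = 4
--     for result in risk_results:
--         level = result.get('risk_level', 'UNKNOWN')
--         if level in names:
--             i = names.index(level)
--             if i < best:
--                 best = i
--     return names[best] if best < 4 else 'UNKNOWN'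
-- ===== Notes on version B (the rewrite author's own statement) =====
-- stated objective: simpler
-- what changed: Replaces A's frequency-count dictionary plus four-way elif cascade with a single running-best severity scan: one pass keeps only the minimal severity rank seen and indexes a name table at the end.
import Mathlib
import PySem

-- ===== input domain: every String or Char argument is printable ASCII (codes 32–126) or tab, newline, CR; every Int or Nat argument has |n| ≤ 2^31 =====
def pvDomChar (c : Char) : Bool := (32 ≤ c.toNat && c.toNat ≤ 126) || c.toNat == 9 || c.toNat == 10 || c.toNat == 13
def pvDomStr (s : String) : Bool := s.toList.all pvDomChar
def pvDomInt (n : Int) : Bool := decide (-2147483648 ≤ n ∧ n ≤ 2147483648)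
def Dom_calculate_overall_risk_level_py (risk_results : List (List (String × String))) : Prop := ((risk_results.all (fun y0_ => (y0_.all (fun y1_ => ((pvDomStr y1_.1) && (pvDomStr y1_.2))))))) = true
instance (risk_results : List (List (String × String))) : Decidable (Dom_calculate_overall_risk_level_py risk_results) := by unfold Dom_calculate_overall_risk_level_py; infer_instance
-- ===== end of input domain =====

-- B replaces A's frequency table plus four-way elif cascade by a single running-best severity scan (objective: simpler).

-- ===== PORT A =====
-- result.get('risk_level', 'UNKNOWN') on the association-list dict (first match)
def pyLevelA (result : List (String × String)) : String :=
  (PySem.Dict.mk result).getD "risk_level" "UNKNOWN"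

def calculate_overall_risk_level_py (risk_results : List (List (String × String))) : String :=
  if risk_results = [] then "UNKNOWN"
  else
    let risk_counts : PySem.Dict String Int :=
      risk_results.foldl (fun d result =>
        let level := pyLevelA result
        d.insert level (d.getD level 0 + 1)) PySem.Dict.empty
    if risk_counts.getD "HIGH" 0 > 0 then "HIGH"
    else if risk_counts.getD "MEDIUM" 0 > 0 then "MEDIUM"
    else if risk_counts.getD "LOW" 0 > 0 then "LOW"
    else if risk_counts.getD "VERY_LOW" 0 > 0 then "VERY_LOW"
    else "UNKNOWN"

-- ===== PORT B =====
def pvNames : List String := ["HIGH", "MEDIUM", "LOW", "VERY_LOW"]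

def calculate_overall_risk_level_py_alt (risk_results : List (List (String × String))) : String :=
  let best : Nat :=
    risk_results.foldl (fun best result =>
      let level := (PySem.Dict.mk result).getD "risk_level" "UNKNOWN"
      match PySem.List.index? pvNames level with
      | some i => if i < best then i else best
      | none => best) 4
  if best < 4 then pvNames.getD best "UNKNOWN" else "UNKNOWN"

-- ===== PRECONDITION & SPEC =====
def Spec_calculate_overall_risk_level_py (risk_results : List (List (String × String))) (out : String) : Prop := out = calculate_overall_risk_level_py_alt risk_results
instance (risk_results : List (List (String × String))) (out : String) : Decidable (Spec_calculate_overall_risk_level_py risk_results out) := by unfold Spec_calculate_overall_risk_level_py; infer_instance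

-- ===== CLAIM (what is proved, stated in full; the proofs are below) =====
def Claim_equal_calculate_overall_risk_level_py : Prop := ∀ (risk_results : List (List (String × String))), Dom_calculate_overall_risk_level_py risk_results → Spec_calculate_overall_risk_level_py risk_results (calculate_overall_risk_level_py risk_results)

-- ===== LEMMAS AND PROOFS =====

-- the minimal rank present in a list of level names (4 = none recognized)
def pvRmin (levels : List String) : Nat :=
  if "HIGH" ∈ levels then 0
  else if "MEDIUM" ∈ levels then 1
  else if "LOW" ∈ levels then 2
  else if "VERY_LOW" ∈ levels then 3
  else 4

lemma pvRmin_cons (l : String) (ls : List String) :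
    pvRmin (l :: ls) = (match PySem.List.index? pvNames l with
      | some i => min i (pvRmin ls)
      | none => pvRmin ls) := by
  by_cases h0 : l = "HIGH"
  · subst h0
    rw [show PySem.List.index? pvNames "HIGH" = some 0 from by decide]
    simp only [pvRmin, List.mem_cons, true_or, if_true, Nat.min_def]
    split_ifs <;> omega
  · by_cases h1 : l = "MEDIUM"
    · subst h1
      rw [show PySem.List.index? pvNames "MEDIUM" = some 1 from by decide]
      simp only [pvRmin, List.mem_cons]
      simp only [show ("HIGH" : String) ≠ "MEDIUM" from by decide, false_or, true_or, if_true]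
      simp only [Nat.min_def]
      split_ifs <;> omega
    · by_cases h2 : l = "LOW"
      · subst h2
        rw [show PySem.List.index? pvNames "LOW" = some 2 from by decide]
        simp only [pvRmin, List.mem_cons]
        simp only [show ("HIGH" : String) ≠ "LOW" from by decide,
          show ("MEDIUM" : String) ≠ "LOW" from by decide, false_or, true_or, if_true]
        simp only [Nat.min_def]
        split_ifs <;> omega
      · by_cases h3 : l = "VERY_LOW"
        · subst h3
          rw [show PySem.List.index? pvNames "VERY_LOW" = some 3 from by decide]
          simp only [pvRmin, List.mem_cons]
          simp only [show ("HIGH" : String) ≠ "VERY_LOW" from by decide,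
            show ("MEDIUM" : String) ≠ "VERY_LOW" from by decide,
            show ("LOW" : String) ≠ "VERY_LOW" from by decide, false_or, true_or, if_true]
          simp only [Nat.min_def]
          split_ifs <;> omega
        · rw [show PySem.List.index? pvNames l = none from by
            rw [PySem.List.index?_eq_none_iff]; simp [pvNames, h0, h1, h2, h3]]
          simp only [pvRmin, List.mem_cons, Ne.symm h0, Ne.symm h1, Ne.symm h2, Ne.symm h3,
            false_or]

lemma pvFold_char (levels : List String) (b : Nat) (hb : b ≤ 4) :
    levels.foldl (fun best level =>
      match PySem.List.index? pvNames level with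
      | some i => if i < best then i else best
      | none => best) b = min b (pvRmin levels) := by
  induction levels generalizing b with
  | nil => simp [pvRmin, Nat.min_def]; omega
  | cons l ls ih =>
    rw [List.foldl_cons, pvRmin_cons]
    cases h : PySem.List.index? pvNames l with
    | none => exact ih b hb
    | some i =>
      have hi : i < 4 := by
        obtain ⟨hk, -⟩ := PySem.List.getElem_of_index?_eq_some h
        simpa [pvNames] using hk
      simp only [h]  -- reduces the match on index? (linter false-positive 'unused')
      rw [show (if i < b then i else b) = min i b from by
        rw [Nat.min_def]; split_ifs <;> omega]
      rw [ih (min i b) (by rw [Nat.min_def]; split_ifs <;> omega)]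
      simp only [Nat.min_def]
      split_ifs <;> omega

lemma pvFoldComp {α β γ : Type} (f : β → γ) (g : α → γ → α) (l : List β) (i : α) :
    l.foldl (fun a b => g a (f b)) i = (l.map f).foldl g i := by
  induction l generalizing i <;> simp [*]

lemma pvCount_lemma (rr : List (List (String × String))) (v : String) :
    (rr.foldl (fun d result =>
        let level := pyLevelA result
        d.insert level (d.getD level 0 + 1)) PySem.Dict.empty).getD v 0
      = ((rr.map pyLevelA).count v : Int) := by
  have key : (rr.foldl (fun d result =>
        let level := pyLevelA result
        d.insert level (d.getD level 0 + 1)) (PySem.Dict.empty : PySem.Dict String Int))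
      = (rr.map pyLevelA).foldl (fun d level => d.insert level (d.getD level 0 + 1))
          PySem.Dict.empty :=
    pvFoldComp pyLevelA (fun d level => d.insert level (d.getD level 0 + 1)) rr
      (PySem.Dict.empty : PySem.Dict String Int)
  rw [key]
  simp [PySem.Dict.getD_foldl_insert_add_one]

lemma pvB_eq (rr : List (List (String × String))) :
    calculate_overall_risk_level_py_alt rr =
      (if pvRmin (rr.map pyLevelA) < 4 then pvNames.getD (pvRmin (rr.map pyLevelA)) "UNKNOWN" else "UNKNOWN") := by
  unfold calculate_overall_risk_level_py_alt
  have h : rr.foldl (fun best result =>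
      let level := (PySem.Dict.mk result).getD "risk_level" "UNKNOWN"
      match PySem.List.index? pvNames level with
      | some i => if i < best then i else best
      | none => best) 4
      = min 4 (pvRmin (rr.map pyLevelA)) := by
    have key : (rr.foldl (fun best result =>
        let level := (PySem.Dict.mk result).getD "risk_level" "UNKNOWN"
        match PySem.List.index? pvNames level with
        | some i => if i < best then i else best
        | none => best) (4 : Nat))
        = (rr.map pyLevelA).foldl (fun best level =>
            match PySem.List.index? pvNames level with
            | some i => if i < best then i else best
            | none => best) (4 : Nat) :=
      pvFoldComp pyLevelA (fun best level =>
          match PySem.List.index? pvNames level with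
          | some i => if i < best then i else best
          | none => best) rr (4 : Nat)
    rw [key]
    exact pvFold_char (rr.map pyLevelA) 4 (by omega)
  rw [h]
  have : pvRmin (rr.map pyLevelA) ≤ 4 := by
    unfold pvRmin; split_ifs <;> omega
  rw [Nat.min_eq_right this]

-- ===== VERDICT (by name: the statement is the Claim_ definition above) =====
theorem calculate_overall_risk_level_py_spec : Claim_equal_calculate_overall_risk_level_py := by
  intro rr _
  unfold Spec_calculate_overall_risk_level_py
  rw [pvB_eq]
  unfold calculate_overall_risk_level_py
  by_cases hnil : rr = []
  · subst hnil; decide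
  · rw [if_neg hnil]
    simp only [pvCount_lemma]
    have hcnt : ∀ v : String, (0 : Int) < ((rr.map pyLevelA).count v : Int) ↔ v ∈ rr.map pyLevelA := by
      intro v
      rw [Int.natCast_pos]
      exact List.count_pos_iff
    unfold pvRmin
    by_cases hH : "HIGH" ∈ rr.map pyLevelA
    · simp [hH, pvNames]
    · by_cases hM : "MEDIUM" ∈ rr.map pyLevelA
      · simp [hH, hM, pvNames]
      · by_cases hL : "LOW" ∈ rr.map pyLevelA
        · simp [hH, hM, hL, pvNames]
        · by_cases hV : "VERY_LOW" ∈ rr.map pyLevelA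
          · simp [hH, hM, hL, hV, pvNames]
          · simp [hH, hM, hL, hV]
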